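-- pv_equiv track=rewrite | github.com/DashaMax/PythonTOP | dz/dz_13/main.py | change_symbol_func
-- ===== SOURCE A (Python) =====
-- def change_symbol_func(s: str, start: str, end: str) -> str:
--     '''
--     Заменяет символ строки на новый только на чётных позициях.
--
--     :param s: строка, в которой нужно выполнить замену
--     :param start: символ, который нужно заменить
--     :param end: символ, на который нужно заменить
--     :return: новая строка
--     '''
--
--     s_new = ''
--
--     for i, item in enumerate(s):
--         if item == start and not i % 2:
--             s_new += end
--             continue
--         s_new += item
--
--     return s_new
-- ===== SOURCE B (Python) =====
-- def change_symbol_func(s: str, start: str, end: str) -> str: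
--     it = iter(s)
--     out = []
--     for c in it:
--         out.append(end if c == start else c)
--         d = next(it, None)
--         if d is not None:
--             out.append(d)
--     return ''.join(out)
-- ===== Notes on version B (the rewrite author's own statement) =====
-- stated objective: alternative
-- what changed: Replaces the indexed enumerate loop with a parity test by consuming the string two characters at a time from an iterator (transform the even-position head, append the odd follower verbatim), eliminating index arithmetic entirely.
import Mathlib
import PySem

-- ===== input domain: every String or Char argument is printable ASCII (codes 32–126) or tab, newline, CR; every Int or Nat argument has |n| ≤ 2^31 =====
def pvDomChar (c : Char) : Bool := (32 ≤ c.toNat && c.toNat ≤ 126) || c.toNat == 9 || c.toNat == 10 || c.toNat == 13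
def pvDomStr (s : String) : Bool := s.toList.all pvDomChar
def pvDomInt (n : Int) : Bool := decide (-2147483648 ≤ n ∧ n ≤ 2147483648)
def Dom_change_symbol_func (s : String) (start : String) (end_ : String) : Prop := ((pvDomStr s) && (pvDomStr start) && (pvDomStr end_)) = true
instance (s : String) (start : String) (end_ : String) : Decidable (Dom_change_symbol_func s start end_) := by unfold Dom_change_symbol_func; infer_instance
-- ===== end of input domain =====

-- B rewrites A's enumerate loop (index parity test + string accumulator) as a
-- recursion consuming two characters at a time; equivalence on return values.

-- ===== PORT A =====
-- 'for i, item in enumerate(s): if item == start and not i % 2: s_new += end; continue; s_new += item'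
def change_symbol_func (s : String) (start : String) (end_ : String) : String :=
  String.ofList ((PySem.List.enumerate s.toList 0).foldl
    (fun acc (p : Int × Char) =>
      if String.ofList [p.2] == start && p.1 % 2 == 0 then acc ++ end_.toList
      else acc ++ [p.2]) [])

-- ===== PORT B =====
-- iterate two characters at a time: transform the head, keep the follower verbatim
def change_symbol_func_altGo (start end_ : String) : List Char → List Char
  | [] => []
  | [c] => if String.ofList [c] == start then end_.toList else [c]
  | c :: d :: rest =>
      (if String.ofList [c] == start then end_.toList else [c]) ++ [d] ++
        change_symbol_func_altGo start end_ rest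

def change_symbol_func_alt (s : String) (start : String) (end_ : String) : String :=
  String.ofList (change_symbol_func_altGo start end_ s.toList)

-- ===== PRECONDITION & SPEC =====
def Spec_change_symbol_func (s : String) (start : String) (end_ : String) (out : String) : Prop := out = change_symbol_func_alt s start end_
instance (s : String) (start : String) (end_ : String) (out : String) : Decidable (Spec_change_symbol_func s start end_ out) := by unfold Spec_change_symbol_func; infer_instance

-- ===== CLAIM (what is proved, stated in full; the proofs are below) =====
def Claim_equal_change_symbol_func : Prop := ∀ (s : String) (start : String) (end_ : String), Dom_change_symbol_func s start end_ → Spec_change_symbol_func s start end_ (change_symbol_func s start end_)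

-- ===== LEMMAS AND PROOFS =====

-- the flatMap body of A's loop
def pvBodyA (start end_ : String) (p : Int × Char) : List Char :=
  if String.ofList [p.2] == start && p.1 % 2 == 0 then end_.toList else [p.2]

-- A's flatMap over an enumeration starting at an even index equals B's recursion
theorem pvFlatMap_eq_altGo (start end_ : String) :
    ∀ (l : List Char) (n : Int), n % 2 = 0 →
      (PySem.List.enumerate l n).flatMap (pvBodyA start end_)
        = change_symbol_func_altGo start end_ l
  | [], n, hn => by
      simp [PySem.List.enumerate_nil, change_symbol_func_altGo]
  | [c], n, hn => by
      simp only [PySem.List.enumerate_cons, PySem.List.enumerate_nil,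
        List.flatMap_cons, List.flatMap_nil, List.append_nil,
        change_symbol_func_altGo, pvBodyA]
      simp [hn]
  | c :: d :: rest, n, hn => by
      have h2 : (n + 1 + 1) % 2 = 0 := by omega
      have h1 : ((n + 1) % 2 == 0) = false := by simp; omega
      simp only [PySem.List.enumerate_cons, List.flatMap_cons,
        change_symbol_func_altGo, pvBodyA,
        pvFlatMap_eq_altGo start end_ rest (n + 1 + 1) h2]
      simp [hn, h1, List.append_assoc]

-- ===== VERDICT (by name: the statement is the Claim_ definition above) =====
theorem change_symbol_func_spec : Claim_equal_change_symbol_func := by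
  intro s start end_ _
  unfold Spec_change_symbol_func change_symbol_func change_symbol_func_alt
  have hfun : (fun (acc : List Char) (p : Int × Char) =>
      if String.ofList [p.2] == start && p.1 % 2 == 0 then acc ++ end_.toList
      else acc ++ [p.2])
      = fun (acc : List Char) p => acc ++ pvBodyA start end_ p := by
    funext acc p
    simp only [pvBodyA]
    split <;> rfl
  rw [hfun, PySem.List.foldl_append_eq_flatMap,
    pvFlatMap_eq_altGo start end_ s.toList 0 (by decide)]
  rfl
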